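-- pv_equiv track=rewrite | github.com/marcin119a/labs_bioinformatics_ads | laby4/1.py | three_numbers_of_small_sum
-- ===== SOURCE A (Python) =====
-- from typing import List, Sequence
--
-- def three_numbers_of_small_sum(nums: List[int], k: int) -> Sequence[int]:
--     nums.sort()
--
--     # Dla każdej liczby w liście jako potencjalny pierwszy kandydat
--     for i in range(len(nums) - 2):
--         # Inicjowanie wskaźników dla pozostałych dwóch liczb
--         left, right = i + 1, len(nums) - 1
--
--         while left < right:
--             # Obliczanie sumy trzech liczb
--             current_sum = nums[i] + nums[left] + nums[right]
--
--             # Jeśli suma jest mniejsza lub równa k, zwracamy te liczby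
--             if current_sum <= k:
--                 return (nums[i], nums[left], nums[right])
--
--             # Jeśli suma jest większa niż k, przesuwamy wskaźnik 'right' w lewo
--             elif current_sum > k:
--                 right -= 1
--
--             # Jeśli suma jest mniejsza, to zwiększamy sumę przesuwając 'left'
--             else:
--                 left += 1
--
--     # Jeśli nie znajdziemy żadnych trzech liczb, zwracamy None
--     return None
-- ===== SOURCE B (Python) =====
-- from typing import List, Sequence
--
-- def three_numbers_of_small_sum(nums: List[int], k: int) -> Sequence[int]:
--     nums.sort()
--     # After sorting, the minimal achievable triple sum is nums[0]+nums[1]+nums[2];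
--     # if it exceeds k there is no answer at all.
--     if len(nums) < 3 or nums[0] + nums[1] + nums[2] > k:
--         return None
--     threshold = k - nums[0] - nums[1]
--     # binary search (bisect_right by hand): first index whose value exceeds threshold
--     lo, hi = 0, len(nums)
--     while lo < hi:
--         mid = (lo + hi) // 2
--         if nums[mid] <= threshold:
--             lo = mid + 1
--         else:
--             hi = mid
--     return (nums[0], nums[1], nums[lo - 1])
-- ===== Notes on version B (the rewrite author's own statement) =====
-- stated objective: alternative
-- what changed: A's nested for/while two-pointer scan over the sorted list is replaced by a single minimal-sum test (nums[0]+nums[1]+nums[2] <= k decides existence, since the list is sorted) plus one hand-written binary search that finds the largest index r with nums[0]+nums[1]+nums[r] <= k.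
import Mathlib
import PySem

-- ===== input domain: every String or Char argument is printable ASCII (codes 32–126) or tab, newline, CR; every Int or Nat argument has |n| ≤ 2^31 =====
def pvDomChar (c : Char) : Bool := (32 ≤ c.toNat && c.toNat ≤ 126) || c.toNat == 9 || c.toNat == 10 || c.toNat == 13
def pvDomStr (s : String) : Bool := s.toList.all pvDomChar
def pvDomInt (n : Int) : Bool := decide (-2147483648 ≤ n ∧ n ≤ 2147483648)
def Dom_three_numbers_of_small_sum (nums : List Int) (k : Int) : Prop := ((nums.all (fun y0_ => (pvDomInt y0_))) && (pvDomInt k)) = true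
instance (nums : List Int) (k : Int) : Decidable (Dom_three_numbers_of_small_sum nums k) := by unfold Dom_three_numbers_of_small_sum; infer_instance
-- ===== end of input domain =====

-- B replaces A's nested two-pointer scan by a minimal-sum test plus one hand-written
-- binary search over the sorted list (objective: alternative algorithm; total cost is sort-dominated).
-- Both versions sort the caller's list in place (same mutation); the equivalence
-- proved here is about the return value.

-- ===== PORT A =====
-- while left < right: …  (all indices accessed are in range, so getD is exact)
def pvWhileA (s : List Int) (k : Int) (i left right : Nat) : Option (List Int) :=
  if h : left < right then
    let cs := s.getD i 0 + s.getD left 0 + s.getD right 0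
    if cs ≤ k then
      some [s.getD i 0, s.getD left 0, s.getD right 0]
    else if cs > k then
      pvWhileA s k i left (right - 1)
    else
      pvWhileA s k i (left + 1) right
  else
    none
termination_by right - left
decreasing_by all_goals omega

-- for i in range(len(nums) - 2): …
def pvForA (s : List Int) (k : Int) : List Nat → Option (List Int)
  | [] => none
  | i :: rest =>
    match pvWhileA s k i (i + 1) (s.length - 1) with
    | some r => some r
    | none => pvForA s k rest

def three_numbers_of_small_sum (nums : List Int) (k : Int) : Option (List Int) :=
  let s := PySem.List.sorted nums (fun x => x) false
  pvForA s k (List.range (s.length - 2))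

-- ===== PORT B =====
-- hand-written bisect_right from Source B
def pvBisect (s : List Int) (t : Int) (lo hi : Nat) : Nat :=
  if h : lo < hi then
    let mid := (lo + hi) / 2
    if s.getD mid 0 ≤ t then pvBisect s t (mid + 1) hi else pvBisect s t lo mid
  else
    lo
termination_by hi - lo
decreasing_by all_goals omega

def three_numbers_of_small_sum_alt (nums : List Int) (k : Int) : Option (List Int) :=
  let s := PySem.List.sorted nums (fun x => x) false
  if s.length < 3 ∨ s.getD 0 0 + s.getD 1 0 + s.getD 2 0 > k then
    none
  else
    let t := k - s.getD 0 0 - s.getD 1 0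
    let lo := pvBisect s t 0 s.length
    some [s.getD 0 0, s.getD 1 0, s.getD (lo - 1) 0]

-- ===== PRECONDITION & SPEC =====
def Spec_three_numbers_of_small_sum (nums : List Int) (k : Int) (out : Option (List Int)) : Prop := out = three_numbers_of_small_sum_alt nums k
instance (nums : List Int) (k : Int) (out : Option (List Int)) : Decidable (Spec_three_numbers_of_small_sum nums k out) := by unfold Spec_three_numbers_of_small_sum; infer_instance

-- ===== CLAIM (what is proved, stated in full; the proofs are below) =====
def Claim_equal_three_numbers_of_small_sum : Prop := ∀ (nums : List Int) (k : Int), Dom_three_numbers_of_small_sum nums k → Spec_three_numbers_of_small_sum nums k (three_numbers_of_small_sum nums k)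

-- ===== LEMMAS AND PROOFS =====

-- unfold the ports (zeta-reduced)
theorem pvA_eq (nums : List Int) (k : Int) :
    three_numbers_of_small_sum nums k =
      pvForA (PySem.List.sorted nums (fun x => x) false) k
        (List.range ((PySem.List.sorted nums (fun x => x) false).length - 2)) := rfl

theorem pvB_eq (nums : List Int) (k : Int) :
    three_numbers_of_small_sum_alt nums k =
      (let s := PySem.List.sorted nums (fun x => x) false
       if s.length < 3 ∨ s.getD 0 0 + s.getD 1 0 + s.getD 2 0 > k then none
       else some [s.getD 0 0, s.getD 1 0,
         s.getD (pvBisect s (k - s.getD 0 0 - s.getD 1 0) 0 s.length - 1) 0]) := rfl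

-- monotone access into the sorted list
theorem pv_getD_mono (xs : List Int) (p q : Nat) (hpq : p ≤ q)
    (hq : q < (PySem.List.sorted xs (fun x => x) false).length) :
    (PySem.List.sorted xs (fun x => x) false).getD p 0 ≤
    (PySem.List.sorted xs (fun x => x) false).getD q 0 := by
  rw [List.getD_eq_getElem _ _ hq, List.getD_eq_getElem _ _ (lt_of_le_of_lt hpq hq)]
  exact PySem.List.sorted_id_getElem_mono xs hpq hq

-- binary-search invariant: pvBisect returns the first index whose value exceeds t
theorem pvBisect_spec (s : List Int) (t : Int) :
    ∀ fuel lo hi, hi - lo ≤ fuel → lo ≤ hi → hi ≤ s.length →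
    (lo > 0 → s.getD (lo - 1) 0 ≤ t) → (hi < s.length → t < s.getD hi 0) →
    lo ≤ pvBisect s t lo hi ∧ pvBisect s t lo hi ≤ hi ∧
    (pvBisect s t lo hi > 0 → s.getD (pvBisect s t lo hi - 1) 0 ≤ t) ∧
    (pvBisect s t lo hi < s.length → t < s.getD (pvBisect s t lo hi) 0) := by
  intro fuel
  induction fuel with
  | zero =>
    intro lo hi hfuel hle hlen hlo hhi
    rw [pvBisect, dif_neg (by omega : ¬ lo < hi)]
    have : lo = hi := by omega
    subst this
    exact ⟨le_refl _, le_refl _, hlo, hhi⟩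
  | succ m ih =>
    intro lo hi hfuel hle hlen hlo hhi
    by_cases h : lo < hi
    · rw [pvBisect]
      simp only [dif_pos h]
      by_cases hc : s.getD ((lo + hi) / 2) 0 ≤ t
      · rw [if_pos hc]
        have r := ih ((lo + hi) / 2 + 1) hi (by omega) (by omega) hlen
          (fun _ => by simpa using hc) hhi
        exact ⟨by omega, r.2.1, r.2.2.1, r.2.2.2⟩
      · rw [if_neg hc]
        have r := ih lo ((lo + hi) / 2) (by omega) (by omega) (by omega)
          hlo (fun _ => by omega)
        exact ⟨r.1, by omega, r.2.2.1, r.2.2.2⟩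
    · rw [pvBisect, dif_neg h]
      have : lo = hi := by omega
      subst this
      exact ⟨le_refl _, le_refl _, hlo, hhi⟩

-- when the minimal triple already exceeds k, every pass of A's while loop fails
theorem pvWhileA_none (s : List Int) (k : Int)
    (hmono : ∀ p q : Nat, p ≤ q → q < s.length → s.getD p 0 ≤ s.getD q 0)
    (hn : 3 ≤ s.length)
    (hbig : k < s.getD 0 0 + s.getD 1 0 + s.getD 2 0) :
    ∀ fuel i left right, right - left ≤ fuel → 1 ≤ left →
      right < s.length → i < s.length →
      pvWhileA s k i left right = none := by
  intro fuel
  induction fuel with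
  | zero =>
    intro i left right hfuel hleft hright hi
    rw [pvWhileA, dif_neg (by omega : ¬ left < right)]
  | succ m ih =>
    intro i left right hfuel hleft hright hi
    by_cases h : left < right
    · have h1 : s.getD 0 0 ≤ s.getD i 0 := hmono 0 i (by omega) hi
      have h2 : s.getD 1 0 ≤ s.getD left 0 := hmono 1 left hleft (by omega)
      have h3 : s.getD 2 0 ≤ s.getD right 0 := hmono 2 right (by omega) hright
      rw [pvWhileA]
      simp only [dif_pos h]
      rw [if_neg (by omega), if_pos (by omega)]
      exact ih i left (right - 1) (by omega) hleft (by omega) hi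
    · rw [pvWhileA, dif_neg h]

-- A's for loop over any index list fails when the minimal triple exceeds k
theorem pvForA_none (s : List Int) (k : Int)
    (hmono : ∀ p q : Nat, p ≤ q → q < s.length → s.getD p 0 ≤ s.getD q 0)
    (hn : 3 ≤ s.length)
    (hbig : k < s.getD 0 0 + s.getD 1 0 + s.getD 2 0) :
    ∀ is : List Nat, (∀ i ∈ is, i < s.length) →
      pvForA s k is = none := by
  intro is
  induction is with
  | nil => intro _; rfl
  | cons i rest ih =>
    intro hmem
    rw [pvForA, pvWhileA_none s k hmono hn hbig (s.length - 1) i (i + 1)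
      (s.length - 1) (by omega) (by omega) (by omega) (hmem i (by simp))]
    exact ih (fun j hj => hmem j (by simp [hj]))

-- the successful case of A's while loop at i = 0: right walks down to p - 1
theorem pvWhileA_found (s : List Int) (k : Int) (p : Nat)
    (hmono : ∀ q r : Nat, q ≤ r → r < s.length → s.getD q 0 ≤ s.getD r 0)
    (hp3 : 3 ≤ p) (hpn : p ≤ s.length)
    (hple : s.getD (p - 1) 0 ≤ k - s.getD 0 0 - s.getD 1 0)
    (hpgt : p < s.length → k - s.getD 0 0 - s.getD 1 0 < s.getD p 0) :
    ∀ fuel right, right - (p - 1) ≤ fuel → p - 1 ≤ right → right ≤ s.length - 1 →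
      pvWhileA s k 0 1 right =
        some [s.getD 0 0, s.getD 1 0, s.getD (p - 1) 0] := by
  intro fuel
  induction fuel with
  | zero =>
    intro right hfuel hge hle
    have heq : right = p - 1 := by omega
    subst heq
    rw [pvWhileA]
    simp only [dif_pos (by omega : 1 < p - 1)]
    rw [if_pos (by omega)]
  | succ m ih =>
    intro right hfuel hge hle
    rcases Nat.eq_or_lt_of_le hge with heq | hlt
    · subst heq
      rw [pvWhileA]
      simp only [dif_pos (by omega : 1 < p - 1)]
      rw [if_pos (by omega)]
    · -- right ≥ p, so s[right] ≥ s[p] and the sum exceeds k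
      have hrlt : right < s.length := by omega
      have hmr : s.getD p 0 ≤ s.getD right 0 := hmono p right (by omega) hrlt
      have ht : k - s.getD 0 0 - s.getD 1 0 < s.getD right 0 := by
        have := hpgt (by omega); omega
      rw [pvWhileA]
      simp only [dif_pos (by omega : 1 < right)]
      rw [if_neg (by omega), if_pos (by omega)]
      exact ih (right - 1) (by omega) (by omega) (by omega)

-- ===== VERDICT (by name: the statement is the Claim_ definition above) =====
theorem three_numbers_of_small_sum_spec : Claim_equal_three_numbers_of_small_sum := by
  intro nums k _
  unfold Spec_three_numbers_of_small_sum
  rw [pvA_eq, pvB_eq]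
  set s := PySem.List.sorted nums (fun x => x) false with hs
  simp only []
  have hmono : ∀ p q : Nat, p ≤ q → q < s.length → s.getD p 0 ≤ s.getD q 0 :=
    fun p q h1 h2 => pv_getD_mono nums p q h1 h2
  by_cases hlen : s.length < 3
  · rw [if_pos (Or.inl hlen)]
    have h0 : s.length - 2 = 0 := by omega
    rw [h0]
    rfl
  · push Not at hlen
    by_cases hbig : s.getD 0 0 + s.getD 1 0 + s.getD 2 0 > k
    · rw [if_pos (Or.inr hbig)]
      exact pvForA_none s k hmono hlen (by omega) _
        (fun i hi => by have := List.mem_range.mp hi; omega)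
    · rw [if_neg (by simp only [not_or, not_lt]; exact ⟨hlen, by omega⟩)]
      push Not at hbig
      have hspec := pvBisect_spec s (k - s.getD 0 0 - s.getD 1 0) s.length 0 s.length
        (by omega) (by omega) (le_refl _) (by omega) (by omega)
      set p := pvBisect s (k - s.getD 0 0 - s.getD 1 0) 0 s.length with hp
      obtain ⟨-, hple, hpos, hlt⟩ := hspec
      have hs2 : s.getD 2 0 ≤ k - s.getD 0 0 - s.getD 1 0 := by omega
      have hp3 : 3 ≤ p := by
        by_contra hc
        push Not at hc
        have h1 := hlt (by omega)
        have h2 : s.getD p 0 ≤ s.getD 2 0 := hmono p 2 (by omega) (by omega)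
        omega
      have hstep : s.getD (p - 1) 0 ≤ k - s.getD 0 0 - s.getD 1 0 := hpos (by omega)
      obtain ⟨mm, hm⟩ : ∃ mm, s.length - 2 = mm + 1 := ⟨s.length - 3, by omega⟩
      rw [hm, List.range_succ_eq_map, pvForA,
        pvWhileA_found s k p hmono hp3 hple hstep hlt (s.length - 1)
          (s.length - 1) (by omega) (by omega) (le_refl _)]
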